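-- pv_equiv track=rewrite | github.com/sergio08301/FiltroLicitaciones | main.py | eliminar_encabezado_reenviado
-- ===== SOURCE A (Python) =====
-- def eliminar_encabezado_reenviado(texto):
--     lineas = texto.splitlines()
--     resultado = []
--     saltando = False
--     for linea in lineas:
--         if any(linea.strip().lower().startswith(prefix) for prefix in ["de:", "enviado el:", "para:", "asunto:"]):
--             saltando = True
--             continue
--         if saltando and linea.strip() == "":
--             saltando = False
--             continue
--         if not saltando:
--             resultado.append(linea)
--     return "\n".join(resultado)
-- ===== SOURCE B (Python) =====
-- def eliminar_encabezado_reenviado(texto):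
--     lineas = texto.splitlines()
--     prefijos = ("de:", "enviado el:", "para:", "asunto:")
--     resultado = []
--     i = 0
--     n = len(lineas)
--     while i < n:
--         if lineas[i].strip().lower().startswith(prefijos):
--             i += 1
--             while i < n and lineas[i].strip() != "":
--                 i += 1
--             i += 1  # consume the terminating blank line (or step past the end)
--         else:
--             resultado.append(lineas[i])
--             i += 1
--     return "\n".join(resultado)
-- ===== Notes on version B (the rewrite author's own statement) =====
-- stated objective: alternative
-- what changed: Replaces the flag-based single pass over all lines with an index-driven outer loop plus an explicit inner skip loop that consumes a header block (non-blank lines and the terminating blank) in one step, eliminating the boolean skip-state variable.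
import Mathlib
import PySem

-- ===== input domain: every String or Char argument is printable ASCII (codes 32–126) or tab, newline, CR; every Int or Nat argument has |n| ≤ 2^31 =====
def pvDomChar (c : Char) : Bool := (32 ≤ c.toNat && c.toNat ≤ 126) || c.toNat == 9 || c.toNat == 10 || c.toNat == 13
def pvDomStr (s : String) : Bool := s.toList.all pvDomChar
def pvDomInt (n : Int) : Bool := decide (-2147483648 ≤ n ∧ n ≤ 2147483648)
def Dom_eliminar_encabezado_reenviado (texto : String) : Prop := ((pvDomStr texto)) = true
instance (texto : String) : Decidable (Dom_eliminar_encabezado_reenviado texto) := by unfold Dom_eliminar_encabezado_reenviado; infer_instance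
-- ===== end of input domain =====

-- B removes forwarded-email header blocks with an index/skip-loop decomposition instead of A's
-- boolean skip flag; same cost, same return value on every input (objective: alternative).

-- the header test both Pythons perform on a line (A: any(...) over the list; B: tuple startswith)
def pvIsHeader (l : String) : Bool :=
  ["de:", "enviado el:", "para:", "asunto:"].any
    (fun p => PySem.Str.startswith (PySem.Str.lower (PySem.Str.strip l)) p)

-- ===== PORT A =====
def pvStepA (st : List String × Bool) (linea : String) : List String × Bool :=
  if pvIsHeader linea then (st.1, true)
  else if st.2 && (PySem.Str.strip linea == "") then (st.1, false)
  else if !st.2 then (st.1 ++ [linea], st.2)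
  else st

def eliminar_encabezado_reenviado (texto : String) : String :=
  PySem.Str.join "\n" (((PySem.Str.splitlines texto)).foldl pvStepA ([], false)).1

-- ===== PORT B =====
-- B's inner 'while i < n and lineas[i].strip() != "": i += 1' followed by 'i += 1':
-- returns the remainder of the line list after the skipped block
def pvSkip : List String → List String
  | [] => []
  | l :: rest => if PySem.Str.strip l == "" then rest else pvSkip rest

theorem pvSkip_length_le (ls : List String) : (pvSkip ls).length ≤ ls.length := by
  induction ls with
  | nil => simp [pvSkip]
  | cons l rest ih =>
    simp only [pvSkip]
    split
    · simp
    · exact Nat.le_succ_of_le ih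

-- B's outer while loop over the line index
def pvLoopB : List String → List String
  | [] => []
  | l :: rest =>
    if pvIsHeader l then pvLoopB (pvSkip rest) else l :: pvLoopB rest
termination_by ls => ls.length
decreasing_by
  · exact Nat.lt_succ_of_le (pvSkip_length_le rest)
  · exact Nat.lt_succ_self _

def eliminar_encabezado_reenviado_alt (texto : String) : String :=
  PySem.Str.join "\n" (pvLoopB (PySem.Str.splitlines texto))

-- ===== PRECONDITION & SPEC =====
def Spec_eliminar_encabezado_reenviado (texto : String) (out : String) : Prop := out = eliminar_encabezado_reenviado_alt texto
instance (texto : String) (out : String) : Decidable (Spec_eliminar_encabezado_reenviado texto out) := by unfold Spec_eliminar_encabezado_reenviado; infer_instance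

-- ===== CLAIM (what is proved, stated in full; the proofs are below) =====
def Claim_equal_eliminar_encabezado_reenviado : Prop := ∀ (texto : String), Dom_eliminar_encabezado_reenviado texto → Spec_eliminar_encabezado_reenviado texto (eliminar_encabezado_reenviado texto)

-- ===== LEMMAS AND PROOFS =====

-- a line matching one of the four header prefixes is not blank
theorem pvHeader_strip_ne (l : String) (h : pvIsHeader l = true) :
    (PySem.Str.strip l == "") = false := by
  by_contra hb
  have he : PySem.Str.strip l = "" := by
    have : (PySem.Str.strip l == "") = true := by
      cases hq : (PySem.Str.strip l == "") with
      | false => exact absurd hq hb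
      | true => rfl
    exact eq_of_beq this
  simp only [pvIsHeader] at h
  rw [he] at h
  exact absurd h (by decide)

-- A's fold from flag=false computes B's loop; from flag=true it computes B's loop after the skip
theorem pvMain (ls : List String) : ∀ acc : List String,
    ((ls.foldl pvStepA (acc, false)).1 = acc ++ pvLoopB ls) ∧
    ((ls.foldl pvStepA (acc, true)).1 = acc ++ pvLoopB (pvSkip ls)) := by
  induction ls with
  | nil => intro acc; simp [pvLoopB, pvSkip]
  | cons l rest ih =>
    intro acc
    constructor
    · by_cases hh : pvIsHeader l = true
      · simp only [List.foldl_cons, pvStepA, hh, if_true]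
        rw [(ih acc).2, pvLoopB, if_pos hh]
      · simp only [List.foldl_cons, pvStepA, hh, Bool.false_and, Bool.not_false,
          Bool.false_eq_true, if_true, if_false]
        rw [(ih (acc ++ [l])).1, pvLoopB, if_neg hh, List.append_assoc]
        rfl
    · by_cases hh : pvIsHeader l = true
      · simp only [List.foldl_cons, pvStepA, hh, if_true]
        rw [(ih acc).2]
        have : pvSkip (l :: rest) = pvSkip rest := by
          rw [pvSkip]
          simp [pvHeader_strip_ne l hh]
        rw [this]
      · by_cases hb : (PySem.Str.strip l == "") = true
        · simp only [List.foldl_cons, pvStepA, hh, Bool.true_and, hb,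
            Bool.false_eq_true, if_true, if_false]
          rw [(ih acc).1]
          have : pvSkip (l :: rest) = rest := by rw [pvSkip, if_pos hb]
          rw [this]
        · simp only [List.foldl_cons, pvStepA, hh, Bool.true_and, hb, Bool.not_true,
            Bool.false_eq_true, if_false]
          rw [(ih acc).2]
          have : pvSkip (l :: rest) = pvSkip rest := by
            rw [pvSkip, if_neg hb]
          rw [this]

-- ===== VERDICT (by name: the statement is the Claim_ definition above) =====
theorem eliminar_encabezado_reenviado_spec : Claim_equal_eliminar_encabezado_reenviado := by
  intro texto _
  unfold Spec_eliminar_encabezado_reenviado eliminar_encabezado_reenviado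
    eliminar_encabezado_reenviado_alt
  rw [(pvMain (PySem.Str.splitlines texto) []).1]
  rfl
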